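-- pv_equiv track=rewrite | github.com/bernardo1963/missing_exons | scripts/find_tandem_repeats_v2.py | get_lex_smallest_monomer
-- ===== SOURCE A (Python) =====
-- def reverse_complement(sequence):
--     """Generate reverse complement of DNA sequence"""
--     complement = str.maketrans('ATCGN', 'TAGCN')
--     return sequence.translate(complement)[::-1]
--
-- def get_lex_smallest_monomer(monomer):
--     """Returns the lexicographically smallest rotation of a repeat monomer, including the reverse-complement"""
--     # For dinucleotides, just compare forward and reverse
--     # if len(monomer) == 2:
--     # return min(monomer, monomer[::-1])
--     # For longer monomers, find all rotations and return the smallest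
--     rotations_F = [monomer[i:] + monomer[:i] for i in range(len(monomer))]
--     # adding the reverse complement
--     monomer_rc = reverse_complement(monomer)
--     rotations_R = [monomer_rc[i:] + monomer_rc[:i] for i in range(len(monomer_rc))]
--     rotations = rotations_F + rotations_R
--     canonical_monomer = min(rotations)
--     orientation=""
--     if canonical_monomer in rotations_F:
--         orientation += "F"
--     if canonical_monomer in rotations_R:
--         orientation += "R"
--     return (canonical_monomer,orientation)
-- ===== SOURCE B (Python) =====
-- _COMP = str.maketrans('ATCGN', 'TAGCN')
--
--
-- def _least_rotation(s):
--     """Lexicographically smallest rotation in O(n) (Booth-style two-pointer algorithm)."""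
--     n = len(s)
--     t = s + s
--     i, j, k = 0, 1, 0
--     while i < n and j < n and k < n:
--         a, b = t[i + k], t[j + k]
--         if a == b:
--             k += 1
--         elif b < a:
--             i += k + 1
--             if i == j:
--                 i += 1
--             k = 0
--         else:
--             j += k + 1
--             if j == i:
--                 j += 1
--             k = 0
--     r = min(i, j)
--     return t[r:r + n]
--
--
-- def get_lex_smallest_monomer(monomer):
--     best_f = _least_rotation(monomer)
--     best_r = _least_rotation(monomer.translate(_COMP)[::-1])
--     if best_f < best_r:
--         return (best_f, "F")
--     if best_r < best_f:
--         return (best_r, "R")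
--     return (best_f, "FR")
-- ===== Notes on version B (the rewrite author's own statement) =====
-- stated objective: faster
-- what changed: A materializes all 2n rotation strings of the monomer and its reverse complement, takes min(), and does two O(n^2) membership scans for the orientation; B instead runs a Booth-style two-pointer least-rotation scan over the doubled string on the forward and reverse-complement sequences and derives the orientation by comparing the two minima directly.
-- outside the precondition, e.g. on get_lex_smallest_monomer(''): A raises ValueError, B returns ('', 'FR')
import Mathlib
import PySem

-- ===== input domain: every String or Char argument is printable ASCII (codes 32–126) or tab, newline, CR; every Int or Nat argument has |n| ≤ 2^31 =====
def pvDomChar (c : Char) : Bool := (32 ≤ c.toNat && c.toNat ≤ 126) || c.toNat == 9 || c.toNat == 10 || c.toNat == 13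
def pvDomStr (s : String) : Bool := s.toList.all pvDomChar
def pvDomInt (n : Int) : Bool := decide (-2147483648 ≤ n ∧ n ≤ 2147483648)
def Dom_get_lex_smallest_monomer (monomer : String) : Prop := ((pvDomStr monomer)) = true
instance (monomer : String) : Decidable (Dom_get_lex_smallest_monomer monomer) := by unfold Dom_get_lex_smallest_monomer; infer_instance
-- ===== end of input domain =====

-- B replaces A's enumerate-all-rotations-then-min with a Booth-style two-pointer least-rotation
-- scan over the doubled string, run on the forward and reverse-complement strings (objective: faster).

-- ===== PORT A =====
-- str.maketrans('ATCGN','TAGCN') + translate is a per-character map (exact: every table entry is a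
-- single char); [::-1] is reversal (PySem.List.slice?_none_none_neg_one). Strings are ported on
-- their toList character lists (String.ofList/ toList), as the PySem prelude prescribes.
def pyComplChar (c : Char) : Char :=
  if c = 'A' then 'T' else if c = 'T' then 'A' else if c = 'C' then 'G'
  else if c = 'G' then 'C' else if c = 'N' then 'N' else c

def reverse_complement (sequence : String) : String :=
  String.ofList ((sequence.toList.map pyComplChar).reverse)

def get_lex_smallest_monomer (monomer : String) : String × String :=
  let cs := monomer.toList
  -- rotations_F = [monomer[i:] + monomer[:i] for i in range(len(monomer))]
  let rotations_F : List (List Char) :=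
    (PySem.List.pyRange 0 (cs.length : Int) 1).map
      (fun i => PySem.List.slice cs (some i) none ++ PySem.List.slice cs none (some i))
  let mrc := (reverse_complement monomer).toList
  -- rotations_R = [monomer_rc[i:] + monomer_rc[:i] for i in range(len(monomer_rc))]
  let rotations_R : List (List Char) :=
    (PySem.List.pyRange 0 (mrc.length : Int) 1).map
      (fun i => PySem.List.slice mrc (some i) none ++ PySem.List.slice mrc none (some i))
  let rotations := rotations_F ++ rotations_R
  -- min(rotations); min() raises ValueError on an empty list: Pre_ excludes monomer = "", the
  -- getD default is never used inside Pre_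
  let canonical := (PySem.List.min? rotations (fun x => x)).getD []
  -- orientation = "" ; if canonical in rotations_F: orientation += "F" ; likewise "R"
  let orientation := (if rotations_F.contains canonical then ['F'] else []) ++
                     (if rotations_R.contains canonical then ['R'] else [])
  (String.ofList canonical, String.ofList orientation)

-- ===== PORT B =====
def rcAlt (monomer : String) : List Char :=
  (monomer.toList.map pyComplChar).reverse

-- the while loop of Source B's _least_rotation; fuel only makes the recursion structural,
-- 3*n+1 steps always suffice (i+j+k grows by ≥ 1 per iteration and stays < 3n while looping)
def pvBooth (t : List Char) (n : Nat) : Nat → Nat → Nat → Nat → Nat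
  | 0, i, j, _k => min i j
  | fuel + 1, i, j, k =>
    if i < n ∧ j < n ∧ k < n then
      let a := t.getD (i + k) default   -- t[i+k]: always in range here (i,k < n, |t| = 2n)
      let b := t.getD (j + k) default
      if a = b then pvBooth t n fuel i j (k + 1)
      else if b < a then
        let i' := i + k + 1
        pvBooth t n fuel (if i' = j then i' + 1 else i') j 0
      else
        let j' := j + k + 1
        pvBooth t n fuel i (if j' = i then j' + 1 else j') 0
    else min i j

def pvLeastRotation (s : List Char) : List Char :=
  let n := s.length
  let t := s ++ s
  let r := pvBooth t n (3 * n + 1) 0 1 0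
  PySem.List.slice t (some (r : Int)) (some ((r : Int) + (n : Int)))   -- t[r:r+n]

def get_lex_smallest_monomer_alt (monomer : String) : String × String :=
  let bf := pvLeastRotation monomer.toList
  let br := pvLeastRotation (rcAlt monomer)
  if bf < br then (String.ofList bf, "F")
  else if br < bf then (String.ofList br, "R")
  else (String.ofList bf, "FR")

-- ===== PRECONDITION & SPEC =====
-- Pre_ excludes only monomer = "", on which A's min([]) raises ValueError.
def Pre_get_lex_smallest_monomer (monomer : String) : Prop := monomer ≠ ""
instance (monomer : String) : Decidable (Pre_get_lex_smallest_monomer monomer) := by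
  unfold Pre_get_lex_smallest_monomer; infer_instance

def pvWitness_get_lex_smallest_monomer : String := "GATTACA"

def Spec_get_lex_smallest_monomer (monomer : String) (out : String × String) : Prop := out = get_lex_smallest_monomer_alt monomer
instance (monomer : String) (out : String × String) : Decidable (Spec_get_lex_smallest_monomer monomer out) := by unfold Spec_get_lex_smallest_monomer; infer_instance

-- ===== CLAIM (what is proved, stated in full; the proofs are below) =====
def Claim_equal_get_lex_smallest_monomer : Prop := ∀ (monomer : String), Dom_get_lex_smallest_monomer monomer → Pre_get_lex_smallest_monomer monomer → Spec_get_lex_smallest_monomer monomer (get_lex_smallest_monomer monomer)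

-- ===== LEMMAS AND PROOFS =====

theorem pvLexLt {x y : List Char} (m : Nat) (hpre : x.take m = y.take m)
    (hx : m < x.length) (hy : m < y.length) (hlt : x[m] < y[m]) : x < y := by
  show x.lt y
  rw [List.lt_iff_lex_lt]
  induction m generalizing x y with
  | zero =>
    cases x with
    | nil => simp at hx
    | cons a xs =>
      cases y with
      | nil => simp at hy
      | cons b ys => exact List.Lex.rel (by simpa using hlt)
  | succ m ih =>
    cases x with
    | nil => simp at hx
    | cons a xs =>
      cases y with
      | nil => simp at hy
      | cons b ys =>
        simp only [List.take_succ_cons, List.cons.injEq] at hpre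
        obtain ⟨rfl, hpre⟩ := hpre
        exact List.Lex.cons (by
          exact (List.lt_iff_lex_lt _ _).mp (ih hpre (by simpa using hx) (by simpa using hy) (by simpa using hlt)))

theorem pvDblGet (cs : List Char) (p m : Nat) (hp : p < cs.length) (hm : m < cs.length)
    (d : Char) : (cs ++ cs).getD (p + m) d = (cs.rotate p).getD m d := by
  rw [List.rotate_eq_drop_append_take (Nat.le_of_lt hp)]
  rcases Nat.lt_or_ge (p + m) cs.length with h | h
  · rw [List.getD_append _ _ _ _ (by omega), List.getD_append _ _ _ _ (by simpa using by omega)]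
    simp [List.getD_eq_getElem?_getD, List.getElem?_drop]
  · rw [List.getD_append_right _ _ _ _ (by omega), List.getD_append_right _ _ _ _ (by simp; omega)]
    simp only [List.length_drop]
    rw [List.getD_eq_getElem?_getD, List.getD_eq_getElem?_getD,
      List.getElem?_take_of_lt (by omega), show p + m - cs.length = m - (cs.length - p) by omega]

theorem pvElim (cs : List Char) (i j k : Nat) (_hi : i < cs.length) (_hj : j < cs.length)
    (hk : k < cs.length)
    (hpre : (cs.rotate i).take k = (cs.rotate j).take k)
    (hlt : (cs.rotate j).getD k default < (cs.rotate i).getD k default) :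
    ∀ d ≤ k, cs.rotate (j + d) < cs.rotate (i + d) := by
  intro d hd
  have hwlen : (cs.rotate i).length = cs.length := List.length_rotate ..
  have hvlen : (cs.rotate j).length = cs.length := List.length_rotate ..
  have hw : cs.rotate (i + d) = (cs.rotate i).drop d ++ (cs.rotate i).take d := by
    rw [← List.rotate_rotate, List.rotate_eq_drop_append_take (by omega)]
  have hv : cs.rotate (j + d) = (cs.rotate j).drop d ++ (cs.rotate j).take d := by
    rw [← List.rotate_rotate, List.rotate_eq_drop_append_take (by omega)]
  rw [hw, hv]
  refine pvLexLt (k - d) ?_ (by simp only [List.length_append, List.length_drop, List.length_take, List.length_rotate]; omega) (by simp only [List.length_append, List.length_drop, List.length_take, List.length_rotate]; omega) ?_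
  · rw [List.take_append_of_le_length (by simp only [List.length_drop, List.length_rotate]; omega),
        List.take_append_of_le_length (by simp only [List.length_drop, List.length_rotate]; omega),
        ← List.drop_take, ← List.drop_take, hpre]
  · rw [List.getElem_append_left (by simp; omega), List.getElem_append_left (by simp; omega)]
    have e1 : ((cs.rotate j).drop d)[k-d]'(by simp; omega) = (cs.rotate j)[k]'(by omega) := by
      rw [List.getElem_drop]; congr 1; omega
    have e2 : ((cs.rotate i).drop d)[k-d]'(by simp; omega) = (cs.rotate i)[k]'(by omega) := by
      rw [List.getElem_drop]; congr 1; omega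
    rw [e1, e2, ← List.getD_eq_getElem _ default (by omega), ← List.getD_eq_getElem _ default (by omega)]
    exact hlt

theorem pvRotPeriod (l : List Char) (dd : Nat) (h : l.rotate dd = l) :
    ∀ e, l.rotate e = l.rotate (e % dd) := by
  intro e
  have hq : ∀ q, l.rotate (dd * q) = l := by
    intro q
    induction q with
    | zero => simp
    | succ q ih => rw [Nat.mul_succ, ← List.rotate_rotate, ih, h]
  conv_lhs => rw [(Nat.div_add_mod e dd).symm]
  rw [← List.rotate_rotate, hq]

theorem pvMinAll (cs : List Char) (r : Nat) (hr : r < cs.length)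
    (H : ∀ p, p < cs.length → cs.rotate r ≤ cs.rotate p ∨
          ∃ q, q < cs.length ∧ cs.rotate q < cs.rotate p) :
    ∀ p, p < cs.length → cs.rotate r ≤ cs.rotate p := by
  obtain ⟨p₀, hp₀mem, hp₀min⟩ := Finset.exists_min_image (Finset.range cs.length)
    (fun p => cs.rotate p) ⟨r, Finset.mem_range.mpr hr⟩
  have hmin : ∀ p, p < cs.length → cs.rotate p₀ ≤ cs.rotate p := by
    intro p hp; exact hp₀min p (Finset.mem_range.mpr hp)
  have hle : cs.rotate r ≤ cs.rotate p₀ := by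
    rcases H p₀ (Finset.mem_range.mp hp₀mem) with h | ⟨q, hq, hlt⟩
    · exact h
    · exact absurd (hmin q hq) (not_le.mpr hlt)
  exact fun p hp => le_trans hle (hmin p hp)

theorem pvExit (cs : List Char) (i j k : Nat)
    (hstop : ¬(i < cs.length ∧ j < cs.length ∧ k < cs.length))
    (h1 : i ≠ j) (h2 : min i j < cs.length)
    (h3 : i < cs.length → j < cs.length →
      k ≤ cs.length ∧ (cs.rotate i).take k = (cs.rotate j).take k)
    (h4 : ∀ p, p < cs.length → p ≠ i → p ≠ j → p < max i j →
      ∃ q, q < cs.length ∧ cs.rotate q < cs.rotate p) :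
    min i j < cs.length ∧
    ∀ p, p < cs.length → cs.rotate (min i j) ≤ cs.rotate p := by
  refine ⟨h2, ?_⟩
  rcases Nat.lt_or_ge i cs.length with hi | hi
  · rcases Nat.lt_or_ge j cs.length with hj | hj
    · -- both < n: k = n, rotations equal, periodicity argument
      obtain ⟨hkn, hpre⟩ := h3 hi hj
      have hk : k = cs.length := by omega
      have heq : cs.rotate i = cs.rotate j := by
        have h := hpre
        rw [hk, List.take_of_length_le (le_of_eq (List.length_rotate ..)),
            List.take_of_length_le (le_of_eq (List.length_rotate ..))] at h
        exact h
      set r := min i j with hr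
      set mx := max i j with hmx
      have hrn : r < cs.length := h2
      have hmxn : mx < cs.length := by omega
      have hd : 0 < mx - r := by omega
      have hrotr_mx : cs.rotate mx = cs.rotate r := by
        rcases Nat.le_total i j with h | h
        · rw [show mx = j by omega, show r = i by omega]; exact heq.symm
        · rw [show mx = i by omega, show r = j by omega]; exact heq
      have hperiod : (cs.rotate r).rotate (mx - r) = cs.rotate r := by
        rw [List.rotate_rotate, show r + (mx - r) = mx by omega, hrotr_mx]
      have hred := pvRotPeriod (cs.rotate r) (mx - r) hperiod
      apply pvMinAll cs r hrn
      intro p hp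
      have hrew : cs.rotate p = cs.rotate (r + (p + cs.length - r) % (mx - r)) := by
        have e1 : cs.rotate p = cs.rotate (r + (p + cs.length - r)) := by
          rw [show r + (p + cs.length - r) = p + cs.length by omega,
              ← List.rotate_mod cs (p + cs.length), Nat.add_mod_right,
              Nat.mod_eq_of_lt hp]
        rw [e1, ← List.rotate_rotate, hred, List.rotate_rotate]
      set p' := r + (p + cs.length - r) % (mx - r) with hp'
      have hp'lt : p' < mx := by
        have := Nat.mod_lt (p + cs.length - r) hd
        omega
      by_cases hpr : p' = r
      · left; rw [hrew, hpr]
      · right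
        obtain ⟨q, hq, hlt⟩ := h4 p' (by omega) (by omega) (by omega) (by omega)
        exact ⟨q, hq, by rwa [← hrew] at hlt⟩
    · -- j ≥ n: result is i
      have hri : min i j = i := by omega
      rw [hri]
      apply pvMinAll cs i (by omega)
      intro p hp
      by_cases hpi : p = i
      · left; rw [hpi]
      · right; exact h4 p hp hpi (by omega) (by omega)
  · -- i ≥ n: result is j
    have hrj : min i j = j := by omega
    rw [hrj]
    apply pvMinAll cs j (by omega)
    intro p hp
    by_cases hpj : p = j
    · left; rw [hpj]
    · right; exact h4 p hp (by omega) hpj (by omega)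

theorem pvBoothPost (cs : List Char) :
    ∀ fuel i j k,
    3 * cs.length + 1 ≤ fuel + (i + j + k) →
    i ≠ j → min i j < cs.length →
    (i < cs.length → j < cs.length →
      k ≤ cs.length ∧ (cs.rotate i).take k = (cs.rotate j).take k) →
    (∀ p, p < cs.length → p ≠ i → p ≠ j → p < max i j →
      ∃ q, q < cs.length ∧ cs.rotate q < cs.rotate p) →
    pvBooth (cs ++ cs) cs.length fuel i j k < cs.length ∧
    ∀ p, p < cs.length →
      cs.rotate (pvBooth (cs ++ cs) cs.length fuel i j k) ≤ cs.rotate p := by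
  intro fuel
  induction fuel with
  | zero =>
    intro i j k hf h1 h2 h3 h4
    have hstop : ¬(i < cs.length ∧ j < cs.length ∧ k < cs.length) := by omega
    simpa only [pvBooth] using pvExit cs i j k hstop h1 h2 h3 h4
  | succ fuel ih =>
    intro i j k hf h1 h2 h3 h4
    by_cases hcond : i < cs.length ∧ j < cs.length ∧ k < cs.length
    · obtain ⟨hi, hj, hk⟩ := hcond
      have hn1 : 1 ≤ cs.length := by omega
      obtain ⟨hkn, hpre⟩ := h3 hi hj
      have ha : (cs ++ cs).getD (i + k) default = (cs.rotate i).getD k default :=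
        pvDblGet cs i k hi hk default
      have hb : (cs ++ cs).getD (j + k) default = (cs.rotate j).getD k default :=
        pvDblGet cs j k hj hk default
      by_cases hab : (cs ++ cs).getD (i + k) default = (cs ++ cs).getD (j + k) default
      · -- equal chars: extend the common prefix
        rw [pvBooth, if_pos ⟨hi, hj, hk⟩, if_pos hab]
        apply ih i j (k + 1) (by omega) h1 h2 ?_ h4
        intro _ _
        refine ⟨by omega, ?_⟩
        rw [List.take_add_one, List.take_add_one, hpre,
            List.getElem?_eq_getElem (by simp; omega),
            List.getElem?_eq_getElem (by simp; omega),
            ← List.getD_eq_getElem _ default (by simp; omega),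
            ← List.getD_eq_getElem _ default (by simp; omega),
            ← ha, ← hb, hab]
      · by_cases hba : (cs ++ cs).getD (j + k) default < (cs ++ cs).getD (i + k) default
        · -- b < a : i jumps past i+k
          rw [pvBooth, if_pos ⟨hi, hj, hk⟩, if_neg hab, if_pos hba]
          have helim : ∀ d ≤ k, cs.rotate (j + d) < cs.rotate (i + d) :=
            pvElim cs i j k hi hj hk hpre (by rw [← ha, ← hb]; exact hba)
          have hwin : ∀ p, p < cs.length → i ≤ p → p ≤ i + k →
              ∃ q, q < cs.length ∧ cs.rotate q < cs.rotate p := by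
            intro p hp hip hpk
            refine ⟨(j + (p - i)) % cs.length, Nat.mod_lt _ (by omega), ?_⟩
            have h5 := helim (p - i) (by omega)
            rw [show i + (p - i) = p by omega] at h5
            rwa [List.rotate_mod]
          have key : ∀ i'' : Nat, i'' = (if i + k + 1 = j then i + k + 1 + 1 else i + k + 1) →
              pvBooth (cs ++ cs) cs.length fuel i'' j 0 < cs.length ∧
              ∀ p, p < cs.length →
                cs.rotate (pvBooth (cs ++ cs) cs.length fuel i'' j 0) ≤ cs.rotate p := by
            intro i'' hi''
            have hi''spec : (i'' = i + k + 1 ∧ i + k + 1 ≠ j) ∨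
                (i'' = i + k + 2 ∧ i + k + 1 = j) := by
              by_cases hij : i + k + 1 = j
              · right; rw [hi'', if_pos hij]; omega
              · left; rw [hi'', if_neg hij]; omega
            apply ih i'' j 0 (by omega) (by omega) (by omega)
              (fun _ _ => ⟨Nat.zero_le _, by simp⟩)
            intro p hp hpi'' hpj hpmax
            by_cases hwindow : i ≤ p ∧ p ≤ i + k
            · exact hwin p hp hwindow.1 hwindow.2
            · exact h4 p hp (by omega) hpj (by omega)
          exact key _ rfl
        · -- a < b : j jumps past j+k
          rw [pvBooth, if_pos ⟨hi, hj, hk⟩, if_neg hab, if_neg hba]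
          have hlt : (cs.rotate i).getD k default < (cs.rotate j).getD k default := by
            rw [← ha, ← hb]
            rcases lt_or_ge ((cs ++ cs).getD (i + k) default)
              ((cs ++ cs).getD (j + k) default) with h | h
            · exact h
            · exact absurd (le_antisymm (le_of_not_gt hba) h) hab
          have helim : ∀ d ≤ k, cs.rotate (i + d) < cs.rotate (j + d) :=
            pvElim cs j i k hj hi hk hpre.symm hlt
          have hwin : ∀ p, p < cs.length → j ≤ p → p ≤ j + k →
              ∃ q, q < cs.length ∧ cs.rotate q < cs.rotate p := by
            intro p hp hjp hpk
            refine ⟨(i + (p - j)) % cs.length, Nat.mod_lt _ (by omega), ?_⟩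
            have h5 := helim (p - j) (by omega)
            rw [show j + (p - j) = p by omega] at h5
            rwa [List.rotate_mod]
          have key : ∀ j'' : Nat, j'' = (if j + k + 1 = i then j + k + 1 + 1 else j + k + 1) →
              pvBooth (cs ++ cs) cs.length fuel i j'' 0 < cs.length ∧
              ∀ p, p < cs.length →
                cs.rotate (pvBooth (cs ++ cs) cs.length fuel i j'' 0) ≤ cs.rotate p := by
            intro j'' hj''
            have hj''spec : (j'' = j + k + 1 ∧ j + k + 1 ≠ i) ∨
                (j'' = j + k + 2 ∧ j + k + 1 = i) := by
              by_cases hji : j + k + 1 = i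
              · right; rw [hj'', if_pos hji]; omega
              · left; rw [hj'', if_neg hji]; omega
            apply ih i j'' 0 (by omega) (by omega) (by omega)
              (fun _ _ => ⟨Nat.zero_le _, by simp⟩)
            intro p hp hpi hpj'' hpmax
            by_cases hwindow : j ≤ p ∧ p ≤ j + k
            · exact hwin p hp hwindow.1 hwindow.2
            · exact h4 p hp hpi (by omega) (by omega)
          exact key _ rfl
    · rw [pvBooth, if_neg hcond]
      exact pvExit cs i j k hcond h1 h2 h3 h4

theorem pvDoubleSlice (cs : List Char) (r : Nat) (hr : r ≤ cs.length) :
    PySem.List.slice (cs ++ cs) (some (r : Int)) (some ((r : Int) + (cs.length : Int)))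
      = cs.rotate r := by
  rw [PySem.List.slice_natCast_add, List.drop_append_of_le_length hr, List.take_append,
      List.take_of_length_le (by simp), List.rotate_eq_drop_append_take hr]
  congr 1
  congr 1
  simp
  omega

theorem pvLeastRotation_spec (cs : List Char) (hne : cs ≠ []) :
    (∃ r, r < cs.length ∧ pvLeastRotation cs = cs.rotate r) ∧
    ∀ p, p < cs.length → pvLeastRotation cs ≤ cs.rotate p := by
  have hn : 1 ≤ cs.length := List.length_pos_of_ne_nil hne
  have hpost := pvBoothPost cs (3 * cs.length + 1) 0 1 0 (by omega) (by omega) (by omega)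
    (fun _ _ => ⟨Nat.zero_le _, by simp⟩)
    (fun p hp hpi hpj hpmax => by omega)
  obtain ⟨hrlt, hmin⟩ := hpost
  constructor
  · exact ⟨pvBooth (cs ++ cs) cs.length (3 * cs.length + 1) 0 1 0, hrlt, by
      unfold pvLeastRotation
      exact pvDoubleSlice cs _ (le_of_lt hrlt)⟩
  · intro p hp
    have := hmin p hp
    unfold pvLeastRotation
    rwa [pvDoubleSlice cs _ (le_of_lt hrlt)]

theorem pvCore (F R : List (List Char)) (bf br : List Char)
    (hbfF : bf ∈ F) (hminF : ∀ y ∈ F, bf ≤ y)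
    (hbrR : br ∈ R) (hminR : ∀ y ∈ R, br ≤ y) :
    ((PySem.List.min? (F ++ R) (fun x => x)).getD [],
      (if F.contains ((PySem.List.min? (F ++ R) (fun x => x)).getD []) then ['F'] else []) ++
      (if R.contains ((PySem.List.min? (F ++ R) (fun x => x)).getD []) then ['R'] else []))
    = if bf < br then (bf, ['F']) else if br < bf then (br, ['R']) else (bf, ['F', 'R']) := by
  have einst : (fun (a b : List Char) => a.decidableLT b) = (LinearOrder.toDecidableLT (α := List Char)) := by
    funext a b; exact Subsingleton.elim _ _
  obtain ⟨m₀, hm₀⟩ : ∃ m, PySem.List.min? (F ++ R) (fun x => x) = some m := by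
    cases h : PySem.List.min? (F ++ R) (fun x => x) with
    | none =>
      rw [PySem.List.min?_eq_none_iff] at h
      exact absurd (List.mem_append_left R hbfF) (by simp [h])
    | some m => exact ⟨m, rfl⟩
  have hmem := PySem.List.min?_mem hm₀
  have hmin : ∀ y ∈ F ++ R, m₀ ≤ y := fun y hy => by
    have hm₀' := hm₀
    rw [einst] at hm₀'
    have h := PySem.List.min?_isMin (xs := F ++ R) (key := fun x => x) (m := m₀) hm₀' y hy
    simpa using h
  rw [hm₀]
  simp only [Option.getD_some]
  have hbfm : m₀ ≤ bf := hmin bf (List.mem_append_left R hbfF)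
  have hbrm : m₀ ≤ br := hmin br (List.mem_append_right F hbrR)
  by_cases hlt : bf < br
  · have hm₀bf : m₀ = bf := by
      refine le_antisymm hbfm ?_
      rcases List.mem_append.mp hmem with h | h
      · exact hminF _ h
      · exact le_trans (le_of_lt hlt) (hminR _ h)
    have hcF : F.contains m₀ = true := by
      rw [List.contains_iff_mem]; rw [hm₀bf]; exact hbfF
    have hcR : R.contains m₀ = false := by
      rw [Bool.eq_false_iff]
      intro hc
      rw [List.contains_iff_mem] at hc
      have h := hminR _ hc
      rw [hm₀bf] at h
      exact absurd h (not_le.mpr hlt)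
    rw [if_pos hlt]
    have hnotR : bf ∉ R := fun hc => absurd (hminR _ hc) (not_le.mpr hlt)
    simp only [hm₀bf]
    simp [hbfF, hnotR]
  · by_cases hlt' : br < bf
    · have hm₀br : m₀ = br := by
        refine le_antisymm hbrm ?_
        rcases List.mem_append.mp hmem with h | h
        · exact le_trans (le_of_lt hlt') (hminF _ h)
        · exact hminR _ h
      have hcF : F.contains m₀ = false := by
        rw [Bool.eq_false_iff]
        intro hc
        rw [List.contains_iff_mem] at hc
        have h := hminF _ hc
        rw [hm₀br] at h
        exact absurd h (not_le.mpr hlt')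
      have hcR : R.contains m₀ = true := by
        rw [List.contains_iff_mem]; rw [hm₀br]; exact hbrR
      rw [if_neg hlt, if_pos hlt']
      have hnotF : br ∉ F := fun hc => absurd (hminF _ hc) (not_le.mpr hlt')
      simp only [hm₀br]
      simp [hbrR, hnotF]
    · have heq : bf = br := le_antisymm (not_lt.mp hlt') (not_lt.mp hlt)
      have hm₀bf : m₀ = bf := by
        refine le_antisymm hbfm ?_
        rcases List.mem_append.mp hmem with h | h
        · exact hminF _ h
        · have h2 := hminR _ h
          rw [← heq] at h2
          exact h2
      have hcF : F.contains m₀ = true := by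
        rw [List.contains_iff_mem]; rw [hm₀bf]; exact hbfF
      have hcR : R.contains m₀ = true := by
        rw [List.contains_iff_mem]; rw [hm₀bf, heq]; exact hbrR
      rw [if_neg hlt, if_neg hlt']
      have hbfR : bf ∈ R := by rw [heq]; exact hbrR
      simp only [hm₀bf]
      simp [hbfF, hbfR]

theorem pvRotations (cs : List Char) :
    (PySem.List.pyRange 0 (cs.length : Int) 1).map
      (fun i => PySem.List.slice cs (some i) none ++ PySem.List.slice cs none (some i))
    = (List.range cs.length).map (cs.rotate ·) := by
  rw [PySem.List.pyRange_zero_natCast, List.map_map]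
  apply List.map_congr_left
  intro a ha
  simp only [Function.comp]
  rw [PySem.List.slice_from_natCast, PySem.List.slice_to_natCast,
      ← List.rotate_eq_drop_append_take (le_of_lt (List.mem_range.mp ha))]

theorem pvMainEq (monomer : String) (hne : monomer.toList ≠ []) :
    get_lex_smallest_monomer monomer = get_lex_smallest_monomer_alt monomer := by
  obtain ⟨⟨rf, hrf, hbfrot⟩, hbfmin⟩ := pvLeastRotation_spec monomer.toList hne
  have hmrc : (reverse_complement monomer).toList = rcAlt monomer := by
    simp only [reverse_complement, rcAlt, String.toList_ofList]
  have hmrclen : (rcAlt monomer).length = monomer.toList.length := by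
    simp [rcAlt]
  have hmrcne : rcAlt monomer ≠ [] := by
    intro h
    apply hne
    have := congrArg List.length h
    simp only [hmrclen] at this
    exact List.length_eq_zero_iff.mp (by simpa using this)
  obtain ⟨⟨rr, hrr, hbrrot⟩, hbrmin⟩ := pvLeastRotation_spec (rcAlt monomer) hmrcne
  have hbfF : pvLeastRotation monomer.toList
      ∈ (List.range monomer.toList.length).map (monomer.toList.rotate ·) :=
    List.mem_map.mpr ⟨rf, List.mem_range.mpr hrf, hbfrot.symm⟩
  have hminF : ∀ y ∈ (List.range monomer.toList.length).map (monomer.toList.rotate ·),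
      pvLeastRotation monomer.toList ≤ y := by
    intro y hy
    obtain ⟨i, hi, rfl⟩ := List.mem_map.mp hy
    exact hbfmin i (List.mem_range.mp hi)
  have hbrR : pvLeastRotation (rcAlt monomer)
      ∈ (List.range (rcAlt monomer).length).map ((rcAlt monomer).rotate ·) :=
    List.mem_map.mpr ⟨rr, List.mem_range.mpr hrr, hbrrot.symm⟩
  have hminR : ∀ y ∈ (List.range (rcAlt monomer).length).map ((rcAlt monomer).rotate ·),
      pvLeastRotation (rcAlt monomer) ≤ y := by
    intro y hy
    obtain ⟨i, hi, rfl⟩ := List.mem_map.mp hy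
    exact hbrmin i (List.mem_range.mp hi)
  have hcore := pvCore _ _ _ _ hbfF hminF hbrR hminR
  have h1 := congrArg Prod.fst hcore
  have h2 := congrArg Prod.snd hcore
  simp only at h1 h2
  simp only [get_lex_smallest_monomer, get_lex_smallest_monomer_alt]
  rw [hmrc, pvRotations monomer.toList, pvRotations (rcAlt monomer)]
  rcases lt_trichotomy (pvLeastRotation monomer.toList) (pvLeastRotation (rcAlt monomer))
    with hlt | heq | hlt
  · rw [if_pos hlt] at h1 h2 ⊢
    dsimp only at h1 h2
    rw [h2, h1]
  · have hnlt1 : ¬ pvLeastRotation monomer.toList < pvLeastRotation (rcAlt monomer) := by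
      rw [heq]; exact lt_irrefl _
    have hnlt2 : ¬ pvLeastRotation (rcAlt monomer) < pvLeastRotation monomer.toList := by
      rw [heq]; exact lt_irrefl _
    rw [if_neg hnlt1, if_neg hnlt2] at h1 h2 ⊢
    dsimp only at h1 h2
    rw [h2, h1]
  · have hnlt1 : ¬ pvLeastRotation monomer.toList < pvLeastRotation (rcAlt monomer) := asymm hlt
    rw [if_neg hnlt1, if_pos hlt] at h1 h2 ⊢
    dsimp only at h1 h2
    rw [h2, h1]
-- ===== VERDICT (by name: the statement is the Claim_ definition above) =====
theorem get_lex_smallest_monomer_spec : Claim_equal_get_lex_smallest_monomer := by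
  intro monomer _ hpre
  unfold Spec_get_lex_smallest_monomer
  have hne : monomer.toList ≠ [] := by
    intro h
    apply hpre
    rw [← String.ofList_toList (s := monomer), h]
  exact pvMainEq monomer hne
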